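-- pv_equiv track=rewrite | github.com/ben-juodvalkis/Ableton-Device-Creator | sampler/chromatic-mapping/auto_sampled_drum_racks.py | create_drum_rack_samples
-- ===== SOURCE A (Python) =====
-- from typing import List, Dict, Optional
--
-- def create_drum_rack_samples(samples_by_note: Dict[str, str]) -> List[Optional[str]]:
--     """Create ordered list of exactly 32 samples for drum rack pads C1 to G3."""
--     samples = [None] * 32  # Exactly 32 pads in drum rack
--
--     # Generate all note names from C1 to G3 (32 chromatic notes)
--     notes = ['C', 'C#', 'D', 'D#', 'E', 'F', 'F#', 'G', 'G#', 'A', 'A#', 'B']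
--
--     pad_index = 0
--     for octave in range(1, 4):  # Octaves 1, 2, 3
--         for note in notes:
--             if pad_index >= 32:  # Stop at 32 pads
--                 break
--
--             note_name = f"{note}{octave}"
--             if note_name in samples_by_note:
--                 samples[pad_index] = samples_by_note[note_name]
--
--             pad_index += 1
--
--             # Special case: G3 is the 32nd pad (last one)
--             if note_name == "G3":
--                 break
--
--         if pad_index >= 32:
--             break
--
--     return samples
-- ===== SOURCE B (Python) =====
-- # Inverted traversal: instead of generating 32 note names and looking each up,
-- # scan the dict's items once, parse each key into its pad index, and scatter.
-- NOTE_INDEX = {'C': 0, 'C#': 1, 'D': 2, 'D#': 3, 'E': 4, 'F': 5,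
--               'F#': 6, 'G': 7, 'G#': 8, 'A': 9, 'A#': 10, 'B': 11}
-- OCTAVE_OFFSET = {'1': 0, '2': 12, '3': 24}
--
-- def _pad_index(name):
--     """Pad index (0-35) of a note name like 'C#2', or None if not such a name."""
--     pitch, octave = name[:-1], name[-1:]
--     if pitch in NOTE_INDEX and octave in OCTAVE_OFFSET:
--         return NOTE_INDEX[pitch] + OCTAVE_OFFSET[octave]
--     return None
--
-- def create_drum_rack_samples(samples_by_note):
--     """Create ordered list of exactly 32 samples for drum rack pads C1 to G3."""
--     samples = [None] * 32
--     for name, value in samples_by_note.items():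
--         idx = _pad_index(name)
--         if idx is not None and idx < 32:
--             samples[idx] = value
--     return samples
-- ===== Notes on version B (the rewrite author's own statement) =====
-- stated objective: alternative
-- what changed: Inverts the traversal: instead of A's nested octave/note loops with breaks and a G3 sentinel generating 32 names and looking each up in the dict, B makes one pass over the dict's items, parses each key into its pad index via two small lookup tables, and scatters the value into a preallocated 32-slot list; it trades A's fixed 32 probes for a scan of the input.
import Mathlib
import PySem

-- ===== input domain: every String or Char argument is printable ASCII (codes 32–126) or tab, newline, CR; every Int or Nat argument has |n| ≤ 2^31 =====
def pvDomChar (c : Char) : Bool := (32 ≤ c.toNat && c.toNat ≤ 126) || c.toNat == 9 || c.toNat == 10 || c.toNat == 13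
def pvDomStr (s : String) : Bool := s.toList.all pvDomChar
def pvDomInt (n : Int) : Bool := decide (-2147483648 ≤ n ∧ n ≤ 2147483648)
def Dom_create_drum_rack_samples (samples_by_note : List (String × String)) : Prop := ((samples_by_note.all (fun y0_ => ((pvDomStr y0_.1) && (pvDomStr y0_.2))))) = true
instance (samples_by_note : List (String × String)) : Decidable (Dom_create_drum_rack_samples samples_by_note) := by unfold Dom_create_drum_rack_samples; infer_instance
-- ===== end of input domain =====

-- B inverts the traversal: instead of A's nested octave/note loops generating 32 names and
-- looking each up, B scans the dict's items once, parses each key into its pad index, and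
-- scatters the value into a preallocated 32-slot list (alternative decomposition).

-- ===== PORT A =====
-- notes = ['C', 'C#', ...]
def pvNotesA : List String := ["C", "C#", "D", "D#", "E", "F", "F#", "G", "G#", "A", "A#", "B"]

-- inner 'for note in notes' loop; state = (samples, pad_index); returns updated state
-- (breaks return the state early, exactly where Python breaks)
def pvInnerA (d : PySem.Dict String String) (octave : Int) :
    List String → List (Option String) → Nat → (List (Option String) × Nat)
  | [], samples, pad => (samples, pad)
  | note :: rest, samples, pad =>
    if pad ≥ 32 then (samples, pad)   -- if pad_index >= 32: break
    else
      let note_name := note ++ PySem.Int.toStr octave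
      let samples :=
        if (PySem.Dict.contains d note_name) then samples.set pad (PySem.Dict.get? d note_name)
        else samples
      let pad := pad + 1
      if note_name = "G3" then (samples, pad)   -- special case: break after G3
      else pvInnerA d octave rest samples pad

-- outer 'for octave in range(1, 4)' loop
def pvOuterA (d : PySem.Dict String String) :
    List Int → List (Option String) → Nat → List (Option String)
  | [], samples, _ => samples
  | oct :: rest, samples, pad =>
    let s := pvInnerA d oct pvNotesA samples pad
    if s.2 ≥ 32 then s.1 else pvOuterA d rest s.1 s.2

def create_drum_rack_samples (samples_by_note : List (String × String)) : List (Option String) :=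
  pvOuterA (PySem.Dict.mk samples_by_note) (PySem.List.pyRange 1 4 1)
    (List.replicate 32 (none : Option String)) 0

-- ===== PORT B =====
-- NOTE_INDEX and OCTAVE_OFFSET dict constants
def pvNoteIndex : PySem.Dict String Int :=
  PySem.Dict.mk [("C", 0), ("C#", 1), ("D", 2), ("D#", 3), ("E", 4), ("F", 5),
                 ("F#", 6), ("G", 7), ("G#", 8), ("A", 9), ("A#", 10), ("B", 11)]
def pvOctaveOffset : PySem.Dict String Int := PySem.Dict.mk [("1", 0), ("2", 12), ("3", 24)]

-- def _pad_index(name): pitch, octave = name[:-1], name[-1:]; guarded dict lookups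
-- (the NOTE_INDEX[pitch]/OCTAVE_OFFSET[octave] lookups are guarded by the 'in' tests,
--  so porting them as getD with default 0 never takes the default)
def pvPadIndex? (name : String) : Option Int :=
  let pitch := PySem.Str.slice name none (some (-1))
  let octave := PySem.Str.slice name (some (-1)) none
  if PySem.Dict.contains pvNoteIndex pitch && PySem.Dict.contains pvOctaveOffset octave then
    some (PySem.Dict.getD pvNoteIndex pitch 0 + PySem.Dict.getD pvOctaveOffset octave 0)
  else none

-- loop body: 'idx = _pad_index(name); if idx is not None and idx < 32: samples[idx] = value'
-- (idx, when not None, is 0..35, so .toNat is exact for the list assignment)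
def pvPlace (samples : List (Option String)) (e : String × String) : List (Option String) :=
  match pvPadIndex? e.1 with
  | some idx => if idx < 32 then samples.set idx.toNat (some e.2) else samples
  | none => samples

-- 'for name, value in samples_by_note.items(): …' — the association list IS the dict's items
def create_drum_rack_samples_alt (samples_by_note : List (String × String)) : List (Option String) :=
  samples_by_note.foldl pvPlace (List.replicate 32 (none : Option String))

-- ===== PRECONDITION & SPEC =====
-- Pre_ requires pairwise-distinct keys: automatic for any Python dict (which cannot hold
-- duplicate keys), so it excludes no actual input of A; association lists with duplicate
-- keys represent no dict, and there A's first-match lookup vs B's last-write order is accidental.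
def Pre_create_drum_rack_samples (samples_by_note : List (String × String)) : Prop :=
  (samples_by_note.map Prod.fst).Nodup
instance (samples_by_note : List (String × String)) : Decidable (Pre_create_drum_rack_samples samples_by_note) := by unfold Pre_create_drum_rack_samples; infer_instance

def pvWitness_create_drum_rack_samples : (List (String × String)) :=
  [("C1", "kick.wav"), ("D#2", "snare.wav"), ("G3", "hat.wav"), ("B9", "ignored.wav")]

def Spec_create_drum_rack_samples (samples_by_note : List (String × String)) (out : List (Option String)) : Prop := out = create_drum_rack_samples_alt samples_by_note
instance (samples_by_note : List (String × String)) (out : List (Option String)) : Decidable (Spec_create_drum_rack_samples samples_by_note out) := by unfold Spec_create_drum_rack_samples; infer_instance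

-- ===== CLAIM (what is proved, stated in full; the proofs are below) =====
def Claim_equal_create_drum_rack_samples : Prop := ∀ (samples_by_note : List (String × String)), Dom_create_drum_rack_samples samples_by_note → Pre_create_drum_rack_samples samples_by_note → Spec_create_drum_rack_samples samples_by_note (create_drum_rack_samples samples_by_note)

-- ===== LEMMAS AND PROOFS =====

-- the 36 note names 'C1'..'B3' in pad order; pads are the first 32 (G3 is index 31)
def pvAll36 : List String :=
  ["C1", "C#1", "D1", "D#1", "E1", "F1", "F#1", "G1", "G#1", "A1", "A#1", "B1",
   "C2", "C#2", "D2", "D#2", "E2", "F2", "F#2", "G2", "G#2", "A2", "A#2", "B2",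
   "C3", "C#3", "D3", "D#3", "E3", "F3", "F#3", "G3", "G#3", "A3", "A#3", "B3"]

-- ---- A-side: the nested loops are the 32 lookups in pad order ----

theorem pv_set_lookup (xs : List (Option String)) (p : Nat) (d : PySem.Dict String String)
    (n : String) (h : xs[p]? = some none) :
    (if PySem.Dict.contains d n then xs.set p (PySem.Dict.get? d n) else xs) =
      xs.set p (PySem.Dict.get? d n) := by
  rw [PySem.Dict.contains_eq_isSome_get?]
  cases hg : PySem.Dict.get? d n with
  | some v => simp
  | none =>
    rw [if_neg (by simp)]
    refine List.ext_getElem? fun i => ?_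
    rw [List.getElem?_set]
    by_cases hip : p = i
    · subst hip
      rw [if_pos rfl, if_pos (List.getElem?_eq_some_iff.mp h).1, h]
    · rw [if_neg hip]

theorem pv_step {d : PySem.Dict String String} {oct : Int} {note : String} {rest : List String}
    {xs : List (Option String)} {p : Nat} (hp : p < 32)
    (hx : xs[p]? = some none) (hn : note ++ PySem.Int.toStr oct ≠ "G3") :
    pvInnerA d oct (note :: rest) xs p =
      pvInnerA d oct rest (xs.set p (PySem.Dict.get? d (note ++ PySem.Int.toStr oct))) (p + 1) := by
  rw [pvInnerA, if_neg (by omega)]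
  simp only [pv_set_lookup _ _ _ _ hx, if_neg hn]

theorem pv_stepG3 {d : PySem.Dict String String} {oct : Int} {note : String} {rest : List String}
    {xs : List (Option String)} {p : Nat} (hp : p < 32)
    (hx : xs[p]? = some none) (hn : note ++ PySem.Int.toStr oct = "G3") :
    pvInnerA d oct (note :: rest) xs p =
      (xs.set p (PySem.Dict.get? d (note ++ PySem.Int.toStr oct)), p + 1) := by
  rw [pvInnerA, if_neg (by omega)]
  simp only [pv_set_lookup _ _ _ _ hx, if_pos hn]

theorem pv_inner_nil {d : PySem.Dict String String} {oct : Int} {xs : List (Option String)}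
    {p : Nat} : pvInnerA d oct [] xs p = (xs, p) := rfl

-- A, fully unfolded on its literal 32 steps, is the list of lookups at the 32 pad names
theorem pvA_eq (d : PySem.Dict String String) :
    pvOuterA d (PySem.List.pyRange 1 4 1) (List.replicate 32 (none : Option String)) 0 =
      (pvAll36.take 32).map (fun n => PySem.Dict.get? d n) := by
  rw [show PySem.List.pyRange 1 4 1 = [1, 2, 3] from by decide]
  simp [pvOuterA, pv_step, pv_stepG3, pv_inner_nil, pvNotesA, pvAll36,
    show PySem.Int.toStr 1 = "1" from by decide,
    show PySem.Int.toStr 2 = "2" from by decide,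
    show PySem.Int.toStr 3 = "3" from by decide,
    List.replicate, List.set]

-- ---- B-side: parsing facts ----

-- a Python string is its [:-1] part followed by its [-1:] part
theorem pv_split_name (name p o : String)
    (hp : PySem.Str.slice name none (some (-1)) = p)
    (ho : PySem.Str.slice name (some (-1)) none = o) :
    name.toList = p.toList ++ o.toList := by
  have h1 : p.toList = name.toList.dropLast := by
    rw [← hp]; exact PySem.Str.slice_to_neg_one name
  have h2 : o.toList = name.toList.drop (name.toList.length - 1) := by
    rw [← ho]; simp [pysem]
  rw [h1, h2, List.dropLast_eq_take, List.take_append_drop]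

-- completeness: each of the 36 names parses back to its own index
theorem pv_pad_complete : ∀ j : Nat, j < 36 → pvPadIndex? (pvAll36.getD j "") = some (j : Int) := by
  decide

theorem pv_mem_lit {name : String} (t : String) (h : name.toList = t.toList)
    (ht : t ∈ pvAll36) : name ∈ pvAll36 := by
  rw [String.toList_inj.mp h]; exact ht

-- a key whose parse succeeds is one of the 36 names
theorem pv_mem_of_parse (name : String) (i : Int) (h : pvPadIndex? name = some i) :
    name ∈ pvAll36 := by
  simp only [pvPadIndex?] at h
  split at h
  case isFalse => exact absurd h (by simp)
  case isTrue hc =>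
    obtain ⟨h1, h2⟩ : _ ∧ _ := by simpa using hc
    have hp : PySem.Str.slice name none (some (-1)) ∈
        (["C", "C#", "D", "D#", "E", "F", "F#", "G", "G#", "A", "A#", "B"] : List String) := by
      have := (PySem.Dict.contains_iff_mem_keys _ _).mp h1
      simpa [pvNoteIndex] using this
    have ho : PySem.Str.slice name (some (-1)) none ∈ (["1", "2", "3"] : List String) := by
      have := (PySem.Dict.contains_iff_mem_keys _ _).mp h2
      simpa [pvOctaveOffset] using this
    have hsplit := pv_split_name name _ _ rfl rfl
    simp only [List.mem_cons, List.not_mem_nil, or_false] at hp ho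
    rcases hp with hp|hp|hp|hp|hp|hp|hp|hp|hp|hp|hp|hp <;>
      rcases ho with ho|ho|ho <;>
      rw [hp, ho] at hsplit <;>
      first
    | exact pv_mem_lit "C1" (hsplit.trans (by decide)) (by decide)
    | exact pv_mem_lit "C#1" (hsplit.trans (by decide)) (by decide)
    | exact pv_mem_lit "D1" (hsplit.trans (by decide)) (by decide)
    | exact pv_mem_lit "D#1" (hsplit.trans (by decide)) (by decide)
    | exact pv_mem_lit "E1" (hsplit.trans (by decide)) (by decide)
    | exact pv_mem_lit "F1" (hsplit.trans (by decide)) (by decide)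
    | exact pv_mem_lit "F#1" (hsplit.trans (by decide)) (by decide)
    | exact pv_mem_lit "G1" (hsplit.trans (by decide)) (by decide)
    | exact pv_mem_lit "G#1" (hsplit.trans (by decide)) (by decide)
    | exact pv_mem_lit "A1" (hsplit.trans (by decide)) (by decide)
    | exact pv_mem_lit "A#1" (hsplit.trans (by decide)) (by decide)
    | exact pv_mem_lit "B1" (hsplit.trans (by decide)) (by decide)
    | exact pv_mem_lit "C2" (hsplit.trans (by decide)) (by decide)
    | exact pv_mem_lit "C#2" (hsplit.trans (by decide)) (by decide)
    | exact pv_mem_lit "D2" (hsplit.trans (by decide)) (by decide)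
    | exact pv_mem_lit "D#2" (hsplit.trans (by decide)) (by decide)
    | exact pv_mem_lit "E2" (hsplit.trans (by decide)) (by decide)
    | exact pv_mem_lit "F2" (hsplit.trans (by decide)) (by decide)
    | exact pv_mem_lit "F#2" (hsplit.trans (by decide)) (by decide)
    | exact pv_mem_lit "G2" (hsplit.trans (by decide)) (by decide)
    | exact pv_mem_lit "G#2" (hsplit.trans (by decide)) (by decide)
    | exact pv_mem_lit "A2" (hsplit.trans (by decide)) (by decide)
    | exact pv_mem_lit "A#2" (hsplit.trans (by decide)) (by decide)
    | exact pv_mem_lit "B2" (hsplit.trans (by decide)) (by decide)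
    | exact pv_mem_lit "C3" (hsplit.trans (by decide)) (by decide)
    | exact pv_mem_lit "C#3" (hsplit.trans (by decide)) (by decide)
    | exact pv_mem_lit "D3" (hsplit.trans (by decide)) (by decide)
    | exact pv_mem_lit "D#3" (hsplit.trans (by decide)) (by decide)
    | exact pv_mem_lit "E3" (hsplit.trans (by decide)) (by decide)
    | exact pv_mem_lit "F3" (hsplit.trans (by decide)) (by decide)
    | exact pv_mem_lit "F#3" (hsplit.trans (by decide)) (by decide)
    | exact pv_mem_lit "G3" (hsplit.trans (by decide)) (by decide)
    | exact pv_mem_lit "G#3" (hsplit.trans (by decide)) (by decide)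
    | exact pv_mem_lit "A3" (hsplit.trans (by decide)) (by decide)
    | exact pv_mem_lit "A#3" (hsplit.trans (by decide)) (by decide)
    | exact pv_mem_lit "B3" (hsplit.trans (by decide)) (by decide)

-- soundness: a key that parses to index i IS the i-th of the 36 names (and 0 ≤ i < 36)
theorem pv_pad_sound (name : String) (i : Int) (h : pvPadIndex? name = some i) :
    ∃ j : Nat, j < 36 ∧ i = (j : Int) ∧ name = pvAll36.getD j "" := by
  obtain ⟨j, hj, hname⟩ := List.mem_iff_getElem.mp (pv_mem_of_parse name i h)
  have hj36 : j < 36 := by simpa [pvAll36] using hj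
  have hgd : pvAll36.getD j "" = pvAll36[j] := List.getD_eq_getElem _ "" hj
  have hgdname : pvAll36.getD j "" = name := hgd.trans hname
  refine ⟨j, hj36, ?_, hgdname.symm⟩
  have hc := pv_pad_complete j hj36
  rw [hgdname, h] at hc
  exact Option.some.inj hc

-- the parse-test against a fixed pad j is the key-equality test against its name
theorem pv_pred_eq (j : Nat) (hj : j < 36) (k : String) :
    (pvPadIndex? k == some (j : Int)) = (k == pvAll36.getD j "") := by
  cases h : pvPadIndex? k with
  | none =>
    have hk : (k == pvAll36.getD j "") = false := by
      refine beq_eq_false_iff_ne.mpr fun hkeq => ?_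
      rw [hkeq, pv_pad_complete j hj] at h; cases h
    rw [hk]; rfl
  | some i =>
    obtain ⟨j', hj', rfl, rfl⟩ := pv_pad_sound k i h
    by_cases hjj : j' = j
    · subst hjj; simp
    · have hint : ((j' : Int)) ≠ ((j : Int)) := by exact_mod_cast hjj
      have h2 : (pvAll36.getD j' "" == pvAll36.getD j "") = false := by
        refine beq_eq_false_iff_ne.mpr fun heq => ?_
        have hcc := pv_pad_complete j' hj'
        rw [heq, pv_pad_complete j hj] at hcc
        exact hint (Option.some.inj hcc).symm
      rw [h2]
      simp [hint]

-- ---- B-side: the scatter loop, elementwise ----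

theorem pv_place_len (acc : List (Option String)) (e : String × String) :
    (pvPlace acc e).length = acc.length := by
  unfold pvPlace
  cases pvPadIndex? e.1 with
  | none => rfl
  | some idx => dsimp only; split <;> simp

theorem pv_scatter_len (es : List (String × String)) (acc : List (Option String)) :
    (es.foldl pvPlace acc).length = acc.length := by
  induction es generalizing acc with
  | nil => rfl
  | cons e es ih => rw [List.foldl_cons, ih, pv_place_len]

theorem pv_scatter_get (es : List (String × String)) (acc : List (Option String))
    (hlen : acc.length = 32) (j : Nat) (hj : j < 32) :
    (es.foldl pvPlace acc)[j]? =
      match es.reverse.find? (fun e => pvPadIndex? e.1 == some (j : Int)) with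
      | some e => some (some e.2)
      | none => acc[j]? := by
  induction es generalizing acc with
  | nil => simp
  | cons e es ih =>
    rw [List.foldl_cons, ih (pvPlace acc e) (by rw [pv_place_len, hlen]),
      List.reverse_cons, List.find?_append]
    cases hf : es.reverse.find? (fun e => pvPadIndex? e.1 == some (j : Int)) with
    | some f => rfl
    | none =>
      simp only [Option.none_or, List.find?_singleton]
      cases hp : pvPadIndex? e.1 with
      | none =>
        simp only [pvPlace, hp, show (none == some (j : Int)) = false from rfl]
        rfl
      | some idx =>
        obtain ⟨j', hj36, rfl, _⟩ := pv_pad_sound e.1 idx hp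
        simp only [pvPlace, hp]
        by_cases hij : j' = j
        · subst hij
          rw [if_pos (by exact_mod_cast hj)]
          simp only [beq_self_eq_true, if_true, Int.toNat_natCast]
          rw [List.getElem?_set_self (by omega)]
        · have hb : (some ((j' : Nat) : Int) == some ((j : Nat) : Int)) = false :=
            beq_eq_false_iff_ne.mpr fun hc => hij (by exact_mod_cast Option.some.inj hc)
          simp only [hb, Bool.false_eq_true, if_false]
          split
          · rw [List.getElem?_set_ne (by simp; omega)]
          · rfl

-- with pairwise-distinct keys the last matching item is the first one
theorem pv_find_rev (l : List (String × String)) (k : String)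
    (hnd : (l.map Prod.fst).Nodup) :
    l.reverse.find? (fun e => e.1 == k) = l.find? (fun e => e.1 == k) := by
  induction l with
  | nil => rfl
  | cons e es ih =>
    rw [List.map_cons, List.nodup_cons] at hnd
    rw [List.reverse_cons, List.find?_append]
    by_cases hk : e.1 = k
    · have hnone : es.reverse.find? (fun e' => e'.1 == k) = none := by
        rw [List.find?_eq_none]
        intro x hx hpx
        exact hnd.1 (by
          rw [hk, ← beq_iff_eq.mp hpx]
          exact List.mem_map_of_mem (List.mem_reverse.mp hx))
      rw [hnone, Option.none_or, List.find?_cons_of_pos (by simp [hk])]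
      simp [hk]
    · rw [show List.find? (fun e' => e'.1 == k) [e] = none from by
          simp [hk],
        Option.or_none, List.find?_cons_of_neg (by simp [hk])]
      exact ih hnd.2

-- first-match lookup on the association list IS the dict lookup of A's port
theorem pv_get_mk (l : List (String × String)) (k : String) :
    (PySem.Dict.mk l).get? k = (l.find? (fun e => e.1 == k)).map (fun e => e.2) := by
  induction l with
  | nil => rfl
  | cons e es ih =>
    cases e with
    | mk a b =>
      rw [PySem.Dict.get?_mk_cons, List.find?_cons]
      cases h : (a == k) with
      | true => simp
      | false => simp [ih]

-- ===== VERDICT (by name: the statement is the Claim_ definition above) =====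
theorem create_drum_rack_samples_spec : Claim_equal_create_drum_rack_samples := by
  intro l _ hpre
  unfold Spec_create_drum_rack_samples create_drum_rack_samples create_drum_rack_samples_alt
  rw [pvA_eq]
  refine List.ext_getElem? fun j => ?_
  by_cases hj : j < 32
  · rw [pv_scatter_get l _ (by simp) j hj,
      show (fun e : String × String => pvPadIndex? e.1 == some (j : Int)) =
        (fun e : String × String => e.1 == pvAll36.getD j "") from
        funext fun e => pv_pred_eq j (by omega) e.1,
      pv_find_rev l _ hpre]
    have hjl : j < (pvAll36.take 32).length := by simp [pvAll36]; omega
    have hgd : (pvAll36.take 32)[j] = pvAll36.getD j "" := by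
      rw [List.getElem_take, List.getD_eq_getElem _ "" (by simp [pvAll36]; omega)]
    rw [List.getElem?_map, List.getElem?_eq_getElem hjl]
    simp only [Option.map_some, hgd]
    rw [pv_get_mk]
    cases hf : l.find? (fun e => e.1 == pvAll36.getD j "") with
    | some e => rfl
    | none =>
      have hrep : (List.replicate 32 (none : Option String))[j]? = some none := by
        rw [List.getElem?_replicate, if_pos hj]
      exact hrep.symm
  · rw [List.getElem?_eq_none (by simp [pvAll36]; omega),
      List.getElem?_eq_none (by rw [pv_scatter_len]; simp; omega)]
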